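-- pv_equiv track=rewrite | github.com/JaySalma/Python_Advent_of_Code | Day6_1.py | group_separation
-- ===== SOURCE A (Python) =====
-- def group_separation(raw_data):
--     group_answers=[]
--     raw_data=[lines.strip("\n") for lines in raw_data]
--     collect_string=""
--     #seperate group answers from raw_data
--     for lines in raw_data:
--         if lines=="":
--             group_answers.append(collect_string)
--             collect_string=""
--         else:
--             #only add answers not given yet
--             for char in lines:
--                 if collect_string.find(char)<0:
--                     collect_string+=char
--             next
--     next
--     if collect_string!="":
--         group_answers.append(collect_string)
--     return group_answers
-- ===== SOURCE B (Python) =====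
-- def group_separation(raw_data):
--     # Build groups of lines first, then dedup each group's characters in one pass.
--     groups = [[]]
--     for line in raw_data:
--         line = line.strip("\n")
--         if line == "":
--             groups.append([])
--         else:
--             groups[-1].append(line)
--     result = ["".join(dict.fromkeys("".join(g))) for g in groups[:-1]]
--     last = "".join(dict.fromkeys("".join(groups[-1])))
--     if last != "":
--         result.append(last)
--     return result
-- ===== Notes on version B (the rewrite author's own statement) =====
-- stated objective: simpler
-- what changed: B separates the work into two passes: it first builds the list of line-groups, then maps each group to "".join(dict.fromkeys("".join(group))), replacing A's running collect_string with its per-character .find membership scan.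
import Mathlib
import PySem

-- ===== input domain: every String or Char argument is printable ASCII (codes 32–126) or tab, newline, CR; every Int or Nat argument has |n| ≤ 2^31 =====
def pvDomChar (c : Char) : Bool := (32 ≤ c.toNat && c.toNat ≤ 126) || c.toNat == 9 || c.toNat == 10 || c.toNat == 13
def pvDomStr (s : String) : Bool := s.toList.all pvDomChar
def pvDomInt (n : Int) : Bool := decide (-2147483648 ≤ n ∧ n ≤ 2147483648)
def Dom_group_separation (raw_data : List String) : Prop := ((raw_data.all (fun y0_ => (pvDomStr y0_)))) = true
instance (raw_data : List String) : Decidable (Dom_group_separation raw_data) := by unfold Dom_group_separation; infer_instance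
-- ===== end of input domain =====

-- B builds the groups of lines first and then dedups each group's characters with dict.fromkeys,
-- replacing A's running collect_string with its .find membership scan; objective: simpler decomposition.

-- ===== PORT A =====
-- A's inner loop body: add char unless collect_string.find(char) >= 0 (strings worked on as List Char)
def pvAddChar (cs : List Char) (ch : Char) : List Char :=
  if PySem.Chars.find cs [ch] < 0 then cs ++ [ch] else cs

-- A's per-line step over the state (group_answers, collect_string)
def pvStepA (st : List String × List Char) (lines : List Char) : List String × List Char :=
  if lines = [] then (st.1 ++ [String.ofList st.2], [])
  else (st.1, lines.foldl pvAddChar st.2)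

def group_separation (raw_data : List String) : List String :=
  let raw := raw_data.map (fun lines => (PySem.Str.stripChars lines "\n").toList)
  let st := raw.foldl pvStepA ([], [])
  if st.2 ≠ [] then st.1 ++ [String.ofList st.2] else st.1

-- ===== PORT B =====
-- "".join(dict.fromkeys("".join(g)))
def pvUniq (g : List (List Char)) : List Char := PySem.List.dedup g.flatten

-- B's group-building step: blank line starts a new group, otherwise append to the last group
def pvStepB (gs : List (List (List Char))) (line : List Char) : List (List (List Char)) :=
  if line = [] then gs ++ [[]]
  else gs.dropLast ++ [(gs.getLastD []) ++ [line]]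

def group_separation_alt (raw_data : List String) : List String :=
  let groups := raw_data.foldl (fun gs l => pvStepB gs (PySem.Str.stripChars l "\n").toList) [[]]
  let result := groups.dropLast.map (fun g => String.ofList (pvUniq g))
  let last := String.ofList (pvUniq (groups.getLastD []))
  if last ≠ "" then result ++ [last] else result

-- ===== PRECONDITION & SPEC =====
def Spec_group_separation (raw_data : List String) (out : List String) : Prop := out = group_separation_alt raw_data
instance (raw_data : List String) (out : List String) : Decidable (Spec_group_separation raw_data out) := by unfold Spec_group_separation; infer_instance

-- ===== CLAIM (what is proved, stated in full; the proofs are below) =====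
def Claim_equal_group_separation : Prop := ∀ (raw_data : List String), Dom_group_separation raw_data → Spec_group_separation raw_data (group_separation raw_data)

-- ===== LEMMAS AND PROOFS =====

-- the group list B's fold builds, as a structural recursion on the stripped lines
def pvGroups : List (List Char) → List (List Char) → List (List (List Char))
  | [], g => [g]
  | l :: rest, g => if l = [] then g :: pvGroups rest [] else pvGroups rest (g ++ [l])

theorem pvGroups_ne_nil (ls : List (List Char)) (g : List (List Char)) : pvGroups ls g ≠ [] := by
  induction ls generalizing g with
  | nil => simp [pvGroups]
  | cons l rest ih => simp only [pvGroups]; split_ifs <;> simp [ih]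

theorem foldB_eq_pvGroups (ls : List (List Char)) (gs : List (List (List Char)))
    (g : List (List Char)) :
    List.foldl pvStepB (gs ++ [g]) ls = gs ++ pvGroups ls g := by
  induction ls generalizing gs g with
  | nil => simp [pvGroups]
  | cons l rest ih =>
    simp only [List.foldl_cons, pvStepB, pvGroups]
    split_ifs with h
    · rw [show (gs ++ [g]) ++ [([] : List (List Char))] = (gs ++ [g]) ++ [[]] from rfl,
        List.append_assoc] at *
      simpa using ih (gs ++ [g]) []
    · simpa using ih gs (g ++ [l])

theorem addChar_dedup (s : List Char) (ch : Char) :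
    pvAddChar (PySem.List.dedup s) ch = PySem.List.dedup (s ++ [ch]) := by
  have h1 := PySem.Chars.neg_one_le_find (PySem.List.dedup s) [ch]
  have hfind : (PySem.Chars.find (PySem.List.dedup s) [ch] < 0) ↔ ch ∉ PySem.List.dedup s := by
    rw [show (PySem.Chars.find (PySem.List.dedup s) [ch] < 0 ↔
        PySem.Chars.find (PySem.List.dedup s) [ch] = -1) from by omega,
      PySem.Chars.find_eq_neg_one_iff, List.singleton_infix_iff]
  simp only [pvAddChar, PySem.List.dedup, PySem.Set.ofList, List.foldl_append, List.foldl_cons,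
    List.foldl_nil] at *
  simp only [PySem.Set.add]
  split_ifs <;> simp_all

theorem foldl_addChar_dedup (l s : List Char) :
    List.foldl pvAddChar (PySem.List.dedup s) l = PySem.List.dedup (s ++ l) := by
  induction l generalizing s with
  | nil => simp
  | cons ch l ih =>
    rw [List.foldl_cons, addChar_dedup, ih, List.append_assoc]
    rfl

-- B's result read off a group list
def pvOut (grps : List (List (List Char))) : List String :=
  grps.dropLast.map (fun g => String.ofList (pvUniq g)) ++
    (if pvUniq (grps.getLastD []) ≠ [] then [String.ofList (pvUniq (grps.getLastD []))] else [])

theorem pvUniq_append (g : List (List Char)) (l : List Char) :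
    List.foldl pvAddChar (pvUniq g) l = pvUniq (g ++ [l]) := by
  simpa [pvUniq] using foldl_addChar_dedup l g.flatten

theorem mk_eq_empty_iff (cs : List Char) : String.ofList cs = "" ↔ cs = [] := by
  constructor
  · intro h
    have h2 : (String.ofList cs).toList = ("" : String).toList := by rw [h]
    simpa using h2
  · intro h; rw [h]

-- A's trailing flush
def pvFinishA (st : List String × List Char) : List String :=
  if st.2 ≠ [] then st.1 ++ [String.ofList st.2] else st.1

theorem getLastD_cons_of_ne_nil {α : Type} {xs : List α} (h : xs ≠ []) (x d : α) :
    (x :: xs).getLastD d = xs.getLastD d := by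
  cases xs with
  | nil => exact absurd rfl h
  | cons y ys => rfl

theorem main_lemma (ls : List (List Char)) (acc : List String) (g : List (List Char)) :
    pvFinishA (List.foldl pvStepA (acc, pvUniq g) ls) = acc ++ pvOut (pvGroups ls g) := by
  induction ls generalizing acc g with
  | nil =>
    simp only [List.foldl_nil, pvGroups, pvFinishA, pvOut]
    split_ifs <;> simp_all [List.getLastD]
  | cons l rest ih =>
    by_cases h : l = []
    · have h0 : ([] : List Char) = pvUniq [] := rfl
      rw [List.foldl_cons, pvStepA, if_pos h, h0, ih (acc ++ [String.ofList (pvUniq g)]) [],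
        show pvGroups (l :: rest) g = g :: pvGroups rest [] from by simp [pvGroups, h]]
      have hne := pvGroups_ne_nil rest ([] : List (List Char))
      simp only [pvOut, List.dropLast_cons_of_ne_nil hne, List.map_cons,
        getLastD_cons_of_ne_nil hne _ _, List.append_assoc, List.cons_append, List.nil_append]
    · rw [List.foldl_cons, pvStepA, if_neg h, pvUniq_append, ih acc (g ++ [l]),
        show pvGroups (l :: rest) g = pvGroups rest (g ++ [l]) from by simp [pvGroups, h]]

-- ===== VERDICT (by name: the statement is the Claim_ definition above) =====
theorem group_separation_spec : Claim_equal_group_separation := by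
  intro raw_data _
  unfold Spec_group_separation group_separation group_separation_alt
  have hfold : List.foldl (fun gs l => pvStepB gs (PySem.Str.stripChars l "\n").toList) [[]] raw_data
      = List.foldl pvStepB [[]]
        (raw_data.map (fun lines => (PySem.Str.stripChars lines "\n").toList)) := by
    simp [List.foldl_map]
  set ls := raw_data.map (fun lines => (PySem.Str.stripChars lines "\n").toList) with hls
  simp only [hfold]
  have hB : List.foldl pvStepB [[]] ls = pvGroups ls [] := by
    simpa using foldB_eq_pvGroups ls [] []
  have hA := main_lemma ls [] []
  simp only [show pvUniq [] = [] from rfl, List.nil_append, pvFinishA] at hA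
  rw [hA, hB, pvOut]
  have hmk := mk_eq_empty_iff (pvUniq ((pvGroups ls []).getLastD []))
  split_ifs with h1 h2 h2 <;> simp_all
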